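-- pv_equiv track=rewrite | github.com/pypi-data/pypi-mirror-353 | packages/datafog/datafog-4.3.0b1-py3-none-any.whl/datafog/services/text_service.py | _combine_annotations
-- ===== SOURCE A (Python) =====
-- from typing import TYPE_CHECKING, Dict, List, Union
--
-- def _combine_annotations(
--     chunk_annotations: List[Dict[str, List[str]]]
-- ) -> Dict[str, List[str]]:
--     """Combine annotations from multiple chunks."""
--     combined = {}
--     for annotations in chunk_annotations:
--         for entity_type, entities in annotations.items():
--             if entity_type not in combined:
--                 combined[entity_type] = []
--             combined[entity_type].extend(entities)
--     return combined
-- ===== SOURCE B (Python) =====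
-- from typing import Dict, List
--
--
-- def _combine_annotations(
--     chunk_annotations: List[Dict[str, List[str]]]
-- ) -> Dict[str, List[str]]:
--     """Combine annotations from multiple chunks."""
--     types = list(dict.fromkeys(t for chunk in chunk_annotations for t in chunk))
--     return {
--         t: [e for chunk in chunk_annotations if t in chunk for e in chunk[t]]
--         for t in types
--     }
-- ===== Notes on version B (the rewrite author's own statement) =====
-- stated objective: alternative
-- what changed: Inverts the loop nesting: B first collects the ordered list of entity types with dict.fromkeys, then builds the result by a dict comprehension that rescans the chunks per type, instead of A's streaming per-chunk accumulation into a mutable dict.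
import Mathlib
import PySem

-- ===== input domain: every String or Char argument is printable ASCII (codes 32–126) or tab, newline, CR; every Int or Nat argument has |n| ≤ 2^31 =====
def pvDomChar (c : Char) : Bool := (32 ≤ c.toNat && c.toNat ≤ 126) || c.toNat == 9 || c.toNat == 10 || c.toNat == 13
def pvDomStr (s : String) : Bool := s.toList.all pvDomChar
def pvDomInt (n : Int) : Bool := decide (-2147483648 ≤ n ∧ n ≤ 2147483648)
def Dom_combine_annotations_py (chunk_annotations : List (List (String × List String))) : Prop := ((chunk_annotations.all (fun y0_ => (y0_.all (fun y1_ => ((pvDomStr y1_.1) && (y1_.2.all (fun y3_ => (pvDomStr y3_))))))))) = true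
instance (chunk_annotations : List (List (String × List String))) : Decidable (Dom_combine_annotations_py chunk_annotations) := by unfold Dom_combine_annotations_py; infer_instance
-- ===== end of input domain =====

-- ===== PORT A =====
-- B keeps A's return value but inverts the decomposition (collect types first, then gather per type); no speed claim.
def combine_annotations_py (chunk_annotations : List (List (String × List String))) : List (String × List String) :=
  (chunk_annotations.foldl
    (fun combined annotations =>
      annotations.foldl
        (fun c p =>
          let c1 := if c.contains p.1 then c else c.insert p.1 ([] : List String)
          c1.modify p.1 [] (fun v => v ++ p.2))
        combined)
    PySem.Dict.empty).items

-- ===== PORT B =====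
def combine_annotations_py_alt (chunk_annotations : List (List (String × List String))) : List (String × List String) :=
  let types := PySem.List.dedup (chunk_annotations.flatMap (fun chunk => chunk.map (fun p => p.1)))
  types.map (fun t =>
    (t, chunk_annotations.flatMap (fun chunk =>
          if (PySem.Dict.mk chunk).contains t then (PySem.Dict.mk chunk).getD t [] else [])))

-- ===== PRECONDITION & SPEC =====
-- Pre_ excludes only association lists with a duplicated key inside one chunk: such a value does not
-- represent a Python dict at all (a dict cannot hold two entries for one key), so Python A never sees it.
def Pre_combine_annotations_py (chunk_annotations : List (List (String × List String))) : Prop :=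
  ∀ chunk ∈ chunk_annotations, (chunk.map Prod.fst).Nodup

instance (chunk_annotations : List (List (String × List String))) : Decidable (Pre_combine_annotations_py chunk_annotations) := by
  unfold Pre_combine_annotations_py; infer_instance

def pvWitness_combine_annotations_py : (List (List (String × List String))) :=
  [[("PER", ["alice"]), ("ORG", ["acme"])], [("PER", ["bob"])]]

def Spec_combine_annotations_py (chunk_annotations : List (List (String × List String))) (out : List (String × List String)) : Prop := out = combine_annotations_py_alt chunk_annotations
instance (chunk_annotations : List (List (String × List String))) (out : List (String × List String)) : Decidable (Spec_combine_annotations_py chunk_annotations out) := by unfold Spec_combine_annotations_py; infer_instance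

-- ===== CLAIM (what is proved, stated in full; the proofs are below) =====
def Claim_equal_combine_annotations_py : Prop := ∀ (chunk_annotations : List (List (String × List String))), Dom_combine_annotations_py chunk_annotations → Pre_combine_annotations_py chunk_annotations → Spec_combine_annotations_py chunk_annotations (combine_annotations_py chunk_annotations)

-- ===== LEMMAS AND PROOFS =====

-- A's per-pair body (insert-[] if absent, then extend) is one Dict.modify.
theorem stepPair_eq (d : PySem.Dict String (List String)) (p : String × List String) :
    (let c1 := if d.contains p.1 then d else d.insert p.1 ([] : List String)
     c1.modify p.1 [] (fun v => v ++ p.2)) = d.modify p.1 [] (fun v => v ++ p.2) := by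
  by_cases h : d.contains p.1
  · simp [h]
  · simp only [Bool.not_eq_true] at h
    simp [h, PySem.Dict.modify, PySem.Dict.getD_insert_self, PySem.Dict.insert_insert_self,
      PySem.Dict.getD_of_not_contains d ([] : List String) h]

-- A's nested fold is the single fold of Dict.modify over the flattened pair list.
theorem A_eq_fold (cas : List (List (String × List String))) :
    combine_annotations_py cas =
      ((cas.flatMap id).foldl (fun d p => d.modify p.1 [] (fun v => v ++ p.2))
        PySem.Dict.empty).items := by
  unfold combine_annotations_py
  rw [List.foldl_flatMap]
  have hfun : (fun (c : PySem.Dict String (List String)) (p : String × List String) =>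
      (let c1 := if c.contains p.1 then c else c.insert p.1 ([] : List String)
       c1.modify p.1 [] (fun v => v ++ p.2))) =
      fun c p => c.modify p.1 [] (fun v => v ++ p.2) :=
    funext fun c => funext fun p => stepPair_eq c p
  simp only [hfun, id]

-- Value of the modify-fold at one key: old value plus the matching pairs' lists in order.
theorem getD_fold (L : List (String × List String)) (d : PySem.Dict String (List String))
    (t : String) :
    (L.foldl (fun d p => d.modify p.1 [] (fun v => v ++ p.2)) d).getD t [] =
      d.getD t [] ++ (L.filter (fun p => p.1 == t)).flatMap (fun p => p.2) := by
  induction L generalizing d with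
  | nil => simp
  | cons p L ih =>
    simp only [List.foldl_cons, ih, PySem.Dict.getD_modify, List.filter_cons]
    by_cases h : t = p.1
    · simp [h, List.append_assoc]
    · have h2 : ¬ p.1 = t := fun hh => h hh.symm
      simp [h, h2]

-- First-match lookup in an assoc list with distinct keys is the concatenation of matching pairs.
theorem get?_mk_filter (c : List (String × List String)) (h : (c.map Prod.fst).Nodup)
    (t : String) :
    ((PySem.Dict.mk c).get? t).getD [] =
      (c.filter (fun p => p.1 == t)).flatMap (fun p => p.2) := by
  induction c with
  | nil =>
    have : (PySem.Dict.mk ([] : List (String × List String))) = PySem.Dict.empty := rfl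
    simp [this]
  | cons p rest ih =>
    rw [PySem.Dict.get?_mk_cons]
    by_cases hk : p.1 = t
    · have hrest : rest.filter (fun q => q.1 == t) = [] := by
        rw [List.filter_eq_nil_iff]
        intro q hq
        simp only [List.map_cons, List.nodup_cons] at h
        have : q.1 ≠ p.1 := fun he => h.1 (he ▸ List.mem_map_of_mem hq)
        simp [hk ▸ this]
      simp [hk, hrest]
    · have h' : (rest.map Prod.fst).Nodup := by
        simp only [List.map_cons, List.nodup_cons] at h; exact h.2
      simp [hk, ih h']

-- One chunk's contribution for key t equals this chunk's matching pairs, given distinct keys.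
theorem gather_chunk (c : List (String × List String)) (h : (c.map Prod.fst).Nodup)
    (t : String) :
    (if (PySem.Dict.mk c).contains t then (PySem.Dict.mk c).getD t [] else []) =
      (c.filter (fun p => p.1 == t)).flatMap (fun p => p.2) := by
  have hget : (if (PySem.Dict.mk c).contains t then (PySem.Dict.mk c).getD t [] else []) =
      ((PySem.Dict.mk c).get? t).getD [] := by
    rw [PySem.Dict.contains_eq_isSome_get?, PySem.Dict.getD_eq_get?_getD]
    cases (PySem.Dict.mk c).get? t <;> simp
  rw [hget, get?_mk_filter c h t]

-- ===== VERDICT (by name: the statement is the Claim_ definition above) =====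
theorem combine_annotations_py_spec : Claim_equal_combine_annotations_py := by
  intro cas _ hPre
  unfold Spec_combine_annotations_py
  have hnd : ((cas.flatMap id).foldl (fun d p => d.modify p.1 [] (fun v => v ++ p.2))
      (PySem.Dict.empty : PySem.Dict String (List String))).keys.Nodup := by
    exact PySem.Dict.nodup_keys_foldl_modify_key (cas.flatMap id) Prod.fst []
      (fun _ p => (fun v => v ++ p.2)) PySem.Dict.empty (by simp)
  have hkeys : ((cas.flatMap id).foldl (fun d p => d.modify p.1 [] (fun v => v ++ p.2))
      (PySem.Dict.empty : PySem.Dict String (List String))).keys =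
      PySem.Set.ofList ((cas.flatMap id).map Prod.fst) := by
    rw [PySem.Dict.keys_foldl_modify_key (cas.flatMap id) Prod.fst []
      (fun _ p => (fun v => v ++ p.2)) PySem.Dict.empty]
    simp [pysem]
  rw [A_eq_fold, PySem.Dict.items_eq_map_keys _ hnd ([] : List String), hkeys]
  unfold combine_annotations_py_alt
  have htypes : PySem.List.dedup (cas.flatMap (fun chunk => chunk.map (fun p => p.1))) =
      PySem.Set.ofList ((cas.flatMap id).map Prod.fst) := by
    simp [List.flatMap_def]
  rw [htypes]
  apply List.map_congr_left
  intro t _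
  have hB : (cas.flatMap (fun chunk =>
        if (PySem.Dict.mk chunk).contains t then (PySem.Dict.mk chunk).getD t [] else [])) =
      ((cas.flatMap id).filter (fun p => p.1 == t)).flatMap (fun p => p.2) := by
    rw [List.filter_flatMap]
    simp only [id, List.flatMap_assoc]
    exact List.flatMap_congr fun c hc => gather_chunk c (hPre c hc) t
  simp only [getD_fold, hB, PySem.Dict.getD_empty, List.nil_append]
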